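-- pv_equiv track=rewrite | github.com/allpress/weaver | weaver/providers/mail/gmail_imap.py | _split_addrs
-- ===== SOURCE A (Python) =====
-- def _split_addrs(header_value: str) -> list[str]:
--     # Respect commas inside quoted display names.
--     parts: list[str] = []
--     buf: list[str] = []
--     in_quote = False
--     for ch in header_value:
--         if ch == '"':
--             in_quote = not in_quote
--         if ch == "," and not in_quote:
--             parts.append("".join(buf).strip())
--             buf = []
--         else:
--             buf.append(ch)
--     if buf:
--         parts.append("".join(buf).strip())
--     return [p for p in parts if p]
-- ===== SOURCE B (Python) =====
-- def _split_addrs(header_value: str) -> list[str]: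
--     # One pass keeping boundary indices: slice out each comma-separated
--     # segment (commas inside double quotes don't split), strip, drop empties.
--     segments: list[str] = []
--     start = 0
--     in_quote = False
--     for i, ch in enumerate(header_value):
--         if ch == '"':
--             in_quote = not in_quote
--         elif ch == "," and not in_quote:
--             segments.append(header_value[start:i])
--             start = i + 1
--     segments.append(header_value[start:])
--     return [s for s in (seg.strip() for seg in segments) if s]
-- ===== Notes on version B (the rewrite author's own statement) =====
-- stated objective: simpler
-- what changed: B keeps boundary indices and slices each comma-separated segment out of the string in one pass, instead of A's per-character output buffer that is flushed on each splitting comma.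
import Mathlib
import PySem

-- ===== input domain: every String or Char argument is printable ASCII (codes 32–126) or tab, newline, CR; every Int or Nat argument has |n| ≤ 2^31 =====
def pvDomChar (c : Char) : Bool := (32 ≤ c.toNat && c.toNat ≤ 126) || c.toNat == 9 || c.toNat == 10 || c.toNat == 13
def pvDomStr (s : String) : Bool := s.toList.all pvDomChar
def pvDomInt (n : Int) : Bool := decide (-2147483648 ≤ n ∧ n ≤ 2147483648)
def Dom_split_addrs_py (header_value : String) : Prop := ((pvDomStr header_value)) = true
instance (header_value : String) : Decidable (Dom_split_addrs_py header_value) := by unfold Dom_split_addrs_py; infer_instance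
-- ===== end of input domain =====

-- B replaces A's per-character output buffer by boundary indices + slicing (same single pass); objective: simpler decomposition.

-- ===== PORT A =====
-- per-character loop: state (parts, buf, in_quote); commas outside quotes flush the buffer
def aLoop : List Char → List String × List Char × Bool → List String × List Char × Bool
  | [], st => st
  | c :: cs, (parts, buf, q) =>
    let q' := if c = '"' then !q else q
    if c = ',' ∧ q' = false then
      aLoop cs (parts ++ [String.mk (PySem.Chars.strip buf)], [], q')
    else
      aLoop cs (parts, buf ++ [c], q')

def split_addrs_py (header_value : String) : List String :=
  (if (aLoop header_value.toList ([], [], false)).2.1 ≠ [] then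
      (aLoop header_value.toList ([], [], false)).1
        ++ [String.mk (PySem.Chars.strip (aLoop header_value.toList ([], [], false)).2.1)]
    else (aLoop header_value.toList ([], [], false)).1).filter (fun p => p ≠ "")

-- ===== PORT B =====
-- index loop: state (segments, start, in_quote); header_value[start:i] = (full.drop start).take (i - start) since 0 ≤ start ≤ i
def bLoop (full : List Char) : List Char → Nat → List (List Char) × Nat × Bool → List (List Char) × Nat
  | [], _, (segs, start, _) => (segs, start)
  | c :: cs, i, (segs, start, q) =>
    if c = '"' then bLoop full cs (i + 1) (segs, start, !q)
    else if c = ',' ∧ q = false then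
      bLoop full cs (i + 1) (segs ++ [(full.drop start).take (i - start)], i + 1, q)
    else
      bLoop full cs (i + 1) (segs, start, q)

def split_addrs_py_alt (header_value : String) : List String :=
  (((bLoop header_value.toList header_value.toList 0 ([], 0, false)).1
      ++ [header_value.toList.drop (bLoop header_value.toList header_value.toList 0 ([], 0, false)).2]).map
      (fun s => String.mk (PySem.Chars.strip s))).filter (fun p => p ≠ "")

-- ===== PRECONDITION & SPEC =====
def Spec_split_addrs_py (header_value : String) (out : List String) : Prop := out = split_addrs_py_alt header_value
instance (header_value : String) (out : List String) : Decidable (Spec_split_addrs_py header_value out) := by unfold Spec_split_addrs_py; infer_instance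

-- ===== CLAIM (what is proved, stated in full; the proofs are below) =====
def Claim_equal_split_addrs_py : Prop := ∀ (header_value : String), Dom_split_addrs_py header_value → Spec_split_addrs_py header_value (split_addrs_py header_value)

-- ===== LEMMAS AND PROOFS =====

def pvStripMk (s : List Char) : String := String.mk (PySem.Chars.strip s)

lemma aLoop_quote (cs : List Char) (parts : List String) (buf : List Char) (q : Bool) :
    aLoop ('"' :: cs) (parts, buf, q) = aLoop cs (parts, buf ++ ['"'], !q) := by
  simp [aLoop]

lemma aLoop_comma (cs : List Char) (parts : List String) (buf : List Char) :
    aLoop (',' :: cs) (parts, buf, false)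
      = aLoop cs (parts ++ [String.mk (PySem.Chars.strip buf)], [], false) := by
  simp [aLoop]

lemma aLoop_other (c : Char) (cs : List Char) (parts : List String) (buf : List Char) (q : Bool)
    (h1 : c ≠ '"') (h2 : ¬ (c = ',' ∧ q = false)) :
    aLoop (c :: cs) (parts, buf, q) = aLoop cs (parts, buf ++ [c], q) := by
  simp only [aLoop]
  rw [if_neg h1, if_neg h2]

lemma bLoop_quote (full cs : List Char) (i : Nat) (segs : List (List Char)) (start : Nat) (q : Bool) :
    bLoop full ('"' :: cs) i (segs, start, q) = bLoop full cs (i + 1) (segs, start, !q) := by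
  simp [bLoop]

lemma bLoop_comma (full cs : List Char) (i : Nat) (segs : List (List Char)) (start : Nat) :
    bLoop full (',' :: cs) i (segs, start, false)
      = bLoop full cs (i + 1) (segs ++ [(full.drop start).take (i - start)], i + 1, false) := by
  simp [bLoop]

lemma bLoop_other (full : List Char) (c : Char) (cs : List Char) (i : Nat)
    (segs : List (List Char)) (start : Nat) (q : Bool)
    (h1 : c ≠ '"') (h2 : ¬ (c = ',' ∧ q = false)) :
    bLoop full (c :: cs) i (segs, start, q) = bLoop full cs (i + 1) (segs, start, q) := by
  simp only [bLoop]
  rw [if_neg h1, if_neg h2]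

lemma pv_take_push (full : List Char) (i start : Nat) (c : Char) (hs : start ≤ i)
    (hc : full[i]? = some c) :
    (full.drop start).take (i - start) ++ [c] = (full.drop start).take (i + 1 - start) := by
  have h1 : (full.drop start)[i - start]? = some c := by
    rw [List.getElem?_drop, Nat.add_sub_cancel' hs]; exact hc
  have h2 : i + 1 - start = (i - start) + 1 := by omega
  rw [h2, List.take_succ, h1]
  rfl

lemma pv_loop_eq (cs : List Char) : ∀ (full : List Char) (i start : Nat)
    (segs : List (List Char)) (q : Bool),
    cs = full.drop i → start ≤ i →
    (aLoop cs (segs.map pvStripMk, (full.drop start).take (i - start), q)).1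
      = (bLoop full cs i (segs, start, q)).1.map pvStripMk ∧
    (aLoop cs (segs.map pvStripMk, (full.drop start).take (i - start), q)).2.1
      = full.drop (bLoop full cs i (segs, start, q)).2 := by
  induction cs with
  | nil =>
    intro full i start segs q hdrop hs
    have hlen : full.length ≤ i := by
      have h := hdrop.symm
      rw [List.drop_eq_nil_iff] at h
      exact h
    have ht : (full.drop start).take (i - start) = full.drop start := by
      apply List.take_of_length_le
      simp only [List.length_drop]; omega
    simp [aLoop, bLoop, ht]
  | cons c cs ih =>
    intro full i start segs q hdrop hs
    have hi : i < full.length := by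
      by_contra h
      rw [List.drop_eq_nil_of_le (by omega)] at hdrop
      exact List.cons_ne_nil c cs hdrop
    have hcs : cs = full.drop (i + 1) := by
      have h : full.drop (i + 1) = (full.drop i).drop 1 := by
        rw [List.drop_drop]
      rw [h, ← hdrop]
      rfl
    have hc : full[i]? = some c := by
      have h : (c :: cs)[0]? = full[i + 0]? := by rw [hdrop, List.getElem?_drop]
      simpa using h.symm
    by_cases hq : c = '"'
    · subst hq
      rw [aLoop_quote, bLoop_quote, pv_take_push full i start '"' hs hc]
      exact ih full (i + 1) start segs (!q) hcs (by omega)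
    · by_cases hcond : c = ',' ∧ q = false
      · obtain ⟨hc1, hq1⟩ := hcond
        subst hc1; subst hq1
        rw [aLoop_comma, bLoop_comma]
        have hmap : segs.map pvStripMk ++ [String.mk (PySem.Chars.strip ((full.drop start).take (i - start)))]
            = (segs ++ [(full.drop start).take (i - start)]).map pvStripMk := by
          simp [pvStripMk]
        rw [hmap]
        have h0 : ([] : List Char) = (full.drop (i + 1)).take ((i + 1) - (i + 1)) := by simp
        rw [h0]
        exact ih full (i + 1) (i + 1) (segs ++ [(full.drop start).take (i - start)]) false hcs (le_refl _)
      · rw [aLoop_other c cs _ _ q hq hcond, bLoop_other full c cs i segs start q hq hcond,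
            pv_take_push full i start c hs hc]
        exact ih full (i + 1) start segs q hcs (by omega)

-- ===== VERDICT (by name: the statement is the Claim_ definition above) =====
theorem split_addrs_py_spec : Claim_equal_split_addrs_py := by
  intro header _
  obtain ⟨h1, h2⟩ := pv_loop_eq header.toList header.toList 0 0 [] false (by simp) (le_refl 0)
  simp only [Nat.sub_self, List.take_zero, List.map_nil, List.drop_zero] at h1 h2
  unfold Spec_split_addrs_py split_addrs_py split_addrs_py_alt
  rw [show (fun s => String.mk (PySem.Chars.strip s)) = pvStripMk from rfl]
  rw [h1, h2, List.map_append, List.map_cons, List.map_nil, List.filter_append]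
  by_cases hb : List.drop (bLoop header.toList header.toList 0 ([], 0, false)).2 header.toList = []
  · rw [if_neg (not_not_intro hb), hb]
    have hnil : pvStripMk [] = "" := rfl
    simp [hnil]
  · rw [if_pos hb, List.filter_append]
    simp only [pvStripMk]
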